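-- pv_equiv track=rewrite | github.com/mishachepi/junior | src/junior/agent/review_utils.py | _detect_violated_principle
-- ===== SOURCE A (Python) =====
-- def _detect_violated_principle(message: str) -> str:
--     """Detect which design principle is violated based on message content."""
--     message_lower = message.lower()
--
--     if any(word in message_lower for word in ["duplicate", "repeat", "same code", "copy"]):
--         return "DRY (Don't Repeat Yourself)"
--     elif any(word in message_lower for word in ["complex", "complicated", "convoluted", "over"]):
--         return "KISS (Keep It Simple Stupid)"
--     elif "responsibility" in message_lower:
--         return "Single Responsibility Principle"
--     elif "depend" in message_lower:
--         return "Dependency Inversion Principle"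
--     elif "extend" in message_lower or "modify" in message_lower:
--         return "Open/Closed Principle"
--     else:
--         return "General Design Principles"
-- ===== SOURCE B (Python) =====
-- _KEYWORD_PRIORITY = {
--     "duplicate": 0, "repeat": 0, "same code": 0, "copy": 0,
--     "complex": 1, "complicated": 1, "convoluted": 1, "over": 1,
--     "responsibility": 2,
--     "depend": 3,
--     "extend": 4, "modify": 4,
-- }
--
-- _PRINCIPLES = [
--     "DRY (Don't Repeat Yourself)",
--     "KISS (Keep It Simple Stupid)",
--     "Single Responsibility Principle",
--     "Dependency Inversion Principle",
--     "Open/Closed Principle",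
--     "General Design Principles",
-- ]
--
--
-- def _detect_violated_principle(message: str) -> str:
--     """Min-priority selection: find the smallest priority among all keywords
--     that occur in the message, then index into the principle table."""
--     message_lower = message.lower()
--     best = min((prio for word, prio in _KEYWORD_PRIORITY.items()
--                 if word in message_lower), default=len(_PRINCIPLES) - 1)
--     return _PRINCIPLES[best]
-- ===== Notes on version B (the rewrite author's own statement) =====
-- stated objective: alternative
-- what changed: Replaced the if/elif first-match cascade with a min-priority selection: a flat keyword-to-priority map is scanned once, the minimum priority among all matching keywords is taken, and the answer is an index into a principle table (no short-circuiting, no per-branch any()).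
import Mathlib
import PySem

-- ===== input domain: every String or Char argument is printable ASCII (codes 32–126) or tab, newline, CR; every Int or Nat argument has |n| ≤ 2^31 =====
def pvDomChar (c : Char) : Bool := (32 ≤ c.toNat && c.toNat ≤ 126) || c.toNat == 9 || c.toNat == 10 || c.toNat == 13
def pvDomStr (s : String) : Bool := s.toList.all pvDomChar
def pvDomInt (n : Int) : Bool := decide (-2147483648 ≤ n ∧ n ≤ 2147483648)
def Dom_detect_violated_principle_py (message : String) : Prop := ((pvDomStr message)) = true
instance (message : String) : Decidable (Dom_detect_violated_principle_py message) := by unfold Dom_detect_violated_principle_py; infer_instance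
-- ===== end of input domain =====

-- B replaces A's if/elif branch cascade with a min-priority selection over a flat keyword→priority table indexed into a principle list (alternative algorithm; same behaviour).


-- ===== PORT A =====
def detect_violated_principle_py (message : String) : String :=
  let message_lower := PySem.Str.lower message
  if ["duplicate", "repeat", "same code", "copy"].any (fun word => PySem.Str.isIn word message_lower) then
    "DRY (Don't Repeat Yourself)"
  else if ["complex", "complicated", "convoluted", "over"].any (fun word => PySem.Str.isIn word message_lower) then
    "KISS (Keep It Simple Stupid)"
  else if PySem.Str.isIn "responsibility" message_lower then
    "Single Responsibility Principle"
  else if PySem.Str.isIn "depend" message_lower then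
    "Dependency Inversion Principle"
  else if PySem.Str.isIn "extend" message_lower || PySem.Str.isIn "modify" message_lower then
    "Open/Closed Principle"
  else
    "General Design Principles"

-- ===== PORT B =====
def pvKeywordPriority : List (String × Nat) :=
  [ ("duplicate", 0), ("repeat", 0), ("same code", 0), ("copy", 0),
    ("complex", 1), ("complicated", 1), ("convoluted", 1), ("over", 1),
    ("responsibility", 2),
    ("depend", 3),
    ("extend", 4), ("modify", 4) ]

def pvPrinciples : List String :=
  [ "DRY (Don't Repeat Yourself)",
    "KISS (Keep It Simple Stupid)",
    "Single Responsibility Principle",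
    "Dependency Inversion Principle",
    "Open/Closed Principle",
    "General Design Principles" ]

-- min over the matching keywords' priorities, default = index of the last principle
def detect_violated_principle_py_alt (message : String) : String :=
  let message_lower := PySem.Str.lower message
  let best := pvKeywordPriority.foldl
    (fun acc wp => if PySem.Str.isIn wp.1 message_lower then min acc wp.2 else acc)
    (pvPrinciples.length - 1)
  pvPrinciples.getD best "General Design Principles"

-- ===== PRECONDITION & SPEC =====
def Spec_detect_violated_principle_py (message : String) (out : String) : Prop := out = detect_violated_principle_py_alt message
instance (message : String) (out : String) : Decidable (Spec_detect_violated_principle_py message out) := by unfold Spec_detect_violated_principle_py; infer_instance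

-- ===== CLAIM (what is proved, stated in full; the proofs are below) =====
def Claim_equal_detect_violated_principle_py : Prop := ∀ (message : String), Dom_detect_violated_principle_py message → Spec_detect_violated_principle_py message (detect_violated_principle_py message)

-- ===== LEMMAS AND PROOFS =====
-- Both ports are functions of the 12 keyword-membership booleans: abstract them out.
def pvCascade (b1 b2 b3 b4 b5 b6 b7 b8 b9 b10 b11 b12 : Bool) : String :=
  if b1 || (b2 || (b3 || (b4 || false))) then "DRY (Don't Repeat Yourself)"
  else if b5 || (b6 || (b7 || (b8 || false))) then "KISS (Keep It Simple Stupid)"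
  else if b9 then "Single Responsibility Principle"
  else if b10 then "Dependency Inversion Principle"
  else if b11 || b12 then "Open/Closed Principle"
  else "General Design Principles"

def pvMinSel (b1 b2 b3 b4 b5 b6 b7 b8 b9 b10 b11 b12 : Bool) : String :=
  pvPrinciples.getD
    (List.foldl (fun acc (p : Bool × Nat) => if p.1 then min acc p.2 else acc)
      (pvPrinciples.length - 1)
      [(b1,0),(b2,0),(b3,0),(b4,0),(b5,1),(b6,1),(b7,1),(b8,1),(b9,2),(b10,3),(b11,4),(b12,4)])
    "General Design Principles"

theorem pvA_eq_cascade (m : String) :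
    detect_violated_principle_py m
      = pvCascade (PySem.Str.isIn "duplicate" (PySem.Str.lower m)) (PySem.Str.isIn "repeat" (PySem.Str.lower m))
          (PySem.Str.isIn "same code" (PySem.Str.lower m)) (PySem.Str.isIn "copy" (PySem.Str.lower m))
          (PySem.Str.isIn "complex" (PySem.Str.lower m)) (PySem.Str.isIn "complicated" (PySem.Str.lower m))
          (PySem.Str.isIn "convoluted" (PySem.Str.lower m)) (PySem.Str.isIn "over" (PySem.Str.lower m))
          (PySem.Str.isIn "responsibility" (PySem.Str.lower m)) (PySem.Str.isIn "depend" (PySem.Str.lower m))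
          (PySem.Str.isIn "extend" (PySem.Str.lower m)) (PySem.Str.isIn "modify" (PySem.Str.lower m)) := rfl

set_option maxHeartbeats 2000000 in
theorem pvB_eq_minsel (m : String) :
    detect_violated_principle_py_alt m
      = pvMinSel (PySem.Str.isIn "duplicate" (PySem.Str.lower m)) (PySem.Str.isIn "repeat" (PySem.Str.lower m))
          (PySem.Str.isIn "same code" (PySem.Str.lower m)) (PySem.Str.isIn "copy" (PySem.Str.lower m))
          (PySem.Str.isIn "complex" (PySem.Str.lower m)) (PySem.Str.isIn "complicated" (PySem.Str.lower m))
          (PySem.Str.isIn "convoluted" (PySem.Str.lower m)) (PySem.Str.isIn "over" (PySem.Str.lower m))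
          (PySem.Str.isIn "responsibility" (PySem.Str.lower m)) (PySem.Str.isIn "depend" (PySem.Str.lower m))
          (PySem.Str.isIn "extend" (PySem.Str.lower m)) (PySem.Str.isIn "modify" (PySem.Str.lower m)) := rfl

theorem pvCascade_eq_minSel (b1 b2 b3 b4 b5 b6 b7 b8 b9 b10 b11 b12 : Bool) :
    pvCascade b1 b2 b3 b4 b5 b6 b7 b8 b9 b10 b11 b12
      = pvMinSel b1 b2 b3 b4 b5 b6 b7 b8 b9 b10 b11 b12 := by
  revert b1 b2 b3 b4 b5 b6 b7 b8 b9 b10 b11 b12; decide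

-- ===== VERDICT (by name: the statement is the Claim_ definition above) =====
theorem detect_violated_principle_py_spec : Claim_equal_detect_violated_principle_py := by
  intro message _
  unfold Spec_detect_violated_principle_py
  rw [pvA_eq_cascade, pvB_eq_minsel, pvCascade_eq_minSel]
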